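-- pv_equiv track=rewrite | github.com/AI4Finance-Foundation/FinRL-Meta | meta/env_market_impact/backtest_report_generator.py | _truncate_parts
-- ===== SOURCE A (Python) =====
-- def _truncate_parts(parts: list[str], sep: str, max_len: int) -> str:
--     """Join *parts* with *sep*, dropping trailing parts to stay under *max_len*."""
--     if not parts:
--         return ""
--     full = sep.join(parts)
--     if len(full) <= max_len:
--         return full
--     for n in range(len(parts), 0, -1):
--         candidate = sep.join(parts[:n])
--         suffix = f"{sep}+{len(parts) - n}" if n < len(parts) else ""
--         if len(candidate) + len(suffix) <= max_len:
--             return candidate + suffix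
--     return parts[0][:max_len]
-- ===== SOURCE B (Python) =====
-- def _truncate_parts(parts: list[str], sep: str, max_len: int) -> str:
--     """Join *parts* with *sep*, dropping trailing parts to stay under *max_len*.
--
--     Instead of re-joining a prefix at every step (O(n*L)), keep a running
--     candidate length, test each count in O(1), and build the string once.
--     """
--     if not parts:
--         return ""
--     k = len(parts)
--     seplen = len(sep)
--     cand_len = sum(map(len, parts)) + seplen * (k - 1)
--     if cand_len <= max_len:
--         return sep.join(parts)
--     for n in range(k, 0, -1):
--         suffix_len = 0 if n == k else seplen + 1 + len(str(k - n))
--         if cand_len + suffix_len <= max_len: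
--             return sep.join(parts[:n]) + (sep + "+" + str(k - n) if n < k else "")
--         cand_len -= len(parts[n - 1]) + (seplen if n > 1 else 0)
--     return parts[0][:max_len]
-- ===== Notes on version B (the rewrite author's own statement) =====
-- stated objective: faster
-- what changed: A re-joins the prefix parts[:n] at every loop iteration; B precomputes the joined length once and maintains a running candidate length, testing each prefix count in O(1) and building the output string only once.
import Mathlib
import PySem

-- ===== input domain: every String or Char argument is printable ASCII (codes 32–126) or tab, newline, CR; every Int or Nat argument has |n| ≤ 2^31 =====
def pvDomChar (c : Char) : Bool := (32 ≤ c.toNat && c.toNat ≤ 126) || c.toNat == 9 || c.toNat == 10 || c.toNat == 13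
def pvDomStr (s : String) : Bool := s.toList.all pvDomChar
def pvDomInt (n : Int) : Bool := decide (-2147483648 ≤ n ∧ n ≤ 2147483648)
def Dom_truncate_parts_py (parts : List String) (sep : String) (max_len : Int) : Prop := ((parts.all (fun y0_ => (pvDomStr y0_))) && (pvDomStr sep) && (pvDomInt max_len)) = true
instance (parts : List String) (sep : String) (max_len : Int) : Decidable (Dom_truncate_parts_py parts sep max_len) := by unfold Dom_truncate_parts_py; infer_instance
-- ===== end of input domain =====

-- B replaces A's per-iteration re-join by a running candidate length updated in O(1),
-- building the result string only once.

-- ===== PORT A =====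
-- the 'for n in range(len(parts), 0, -1)' loop; at [] the loop fell through: 'return parts[0][:max_len]'
-- (parts is nonempty whenever the loop runs, so pyGetD parts 0 "" is exactly parts[0])
def pvALoop (parts : List String) (sep : String) (max_len : Int) : List Int → String
  | [] => PySem.Str.slice (PySem.List.pyGetD parts 0 "") none (some max_len)
  | n :: rest =>
      let candidate := PySem.Str.join sep (PySem.List.slice parts none (some n))
      let suffix := if n < (parts.length : Int) then sep ++ "+" ++ PySem.Int.toStr ((parts.length : Int) - n) else ""
      if PySem.Str.len candidate + PySem.Str.len suffix ≤ max_len then candidate ++ suffix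
      else pvALoop parts sep max_len rest

def truncate_parts_py (parts : List String) (sep : String) (max_len : Int) : String :=
  if parts = [] then ""
  else
    let full := PySem.Str.join sep parts
    if PySem.Str.len full ≤ max_len then full
    else pvALoop parts sep max_len (PySem.List.pyRange (parts.length : Int) 0 (-1))

-- ===== PORT B =====
-- the same countdown, but carrying candLen = len(sep.join(parts[:n])) as a number
def pvBLoop (parts : List String) (sep : String) (max_len : Int) : List Int → Int → String
  | [], _ => PySem.Str.slice (PySem.List.pyGetD parts 0 "") none (some max_len)
  | n :: rest, candLen =>
      let k : Int := (parts.length : Int)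
      let seplen := PySem.Str.len sep
      let suffixLen := if n = k then 0 else seplen + 1 + PySem.Str.len (PySem.Int.toStr (k - n))
      if candLen + suffixLen ≤ max_len then
        PySem.Str.join sep (PySem.List.slice parts none (some n)) ++
          (if n < k then sep ++ "+" ++ PySem.Int.toStr (k - n) else "")
      else pvBLoop parts sep max_len rest
             (candLen - (PySem.Str.len (PySem.List.pyGetD parts (n - 1) "") + if 1 < n then seplen else 0))

def truncate_parts_py_alt (parts : List String) (sep : String) (max_len : Int) : String :=
  if parts = [] then ""
  else
    let k : Int := (parts.length : Int)
    let candLen := (parts.map PySem.Str.len).sum + PySem.Str.len sep * (k - 1)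
    if candLen ≤ max_len then PySem.Str.join sep parts
    else pvBLoop parts sep max_len (PySem.List.pyRange k 0 (-1)) candLen

-- ===== PRECONDITION & SPEC =====
def Spec_truncate_parts_py (parts : List String) (sep : String) (max_len : Int) (out : String) : Prop := out = truncate_parts_py_alt parts sep max_len
instance (parts : List String) (sep : String) (max_len : Int) (out : String) : Decidable (Spec_truncate_parts_py parts sep max_len out) := by unfold Spec_truncate_parts_py; infer_instance

-- ===== CLAIM (what is proved, stated in full; the proofs are below) =====
def Claim_equal_truncate_parts_py : Prop := ∀ (parts : List String) (sep : String) (max_len : Int), Dom_truncate_parts_py parts sep max_len → Spec_truncate_parts_py parts sep max_len (truncate_parts_py parts sep max_len)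

-- ===== LEMMAS AND PROOFS =====

lemma pv_len_plus : PySem.Str.len "+" = 1 := by decide

-- length of a separator-join, as an integer
lemma pv_join_len (sep : List Char) : ∀ (l : List (List Char)), l ≠ [] →
    ((PySem.Chars.join sep l).length : Int) =
      ((l.map List.length).sum : Int) + (sep.length : Int) * ((l.length : Int) - 1)
  | [], h => absurd rfl h
  | [p], _ => by simp [PySem.Chars.join_singleton]
  | p :: q :: rest, _ => by
      have ih := pv_join_len sep (q :: rest) (by simp)
      rw [PySem.Chars.join_cons_cons]
      simp only [List.length_append, List.map_cons, List.sum_cons, List.length_cons] at *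
      push_cast at *
      linarith

-- length of sep.join(parts[:n]) in terms of the running sums B maintains
lemma pv_len_join_take (parts : List String) (sep : String) (n : Nat)
    (h1 : 1 ≤ n) (hne : parts ≠ []) :
    PySem.Str.len (PySem.Str.join sep (parts.take n)) =
      ((parts.take n).map PySem.Str.len).sum
        + PySem.Str.len sep * (((parts.take n).length : Int) - 1) := by
  have hne' : (parts.take n).map String.toList ≠ [] := by
    cases parts with
    | nil => exact absurd rfl hne
    | cons a t => cases n with
      | zero => omega
      | succ m => simp
  have h := pv_join_len sep.toList ((parts.take n).map String.toList) hne'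
  simp only [PySem.Str.len_eq, PySem.Str.toList_join, List.map_map, List.length_map] at *
  rw [h]
  congr 1
  push_cast
  simp only [List.map_map, Function.comp_def]
  have hfun : PySem.Str.len = (fun x : String => ((x.length : Nat) : Int)) :=
    funext fun s => by simp [PySem.Str.len_eq]
  rw [hfun]
  simp [List.map_take]

-- the two loops agree when B's accumulator carries the candidate length
lemma pv_loop_eq (parts : List String) (sep : String) (max_len : Int) (hne : parts ≠ []) :
    ∀ (n : Nat), n ≤ parts.length → ∀ candLen : Int,
      (1 ≤ n → candLen = ((parts.take n).map PySem.Str.len).sum + PySem.Str.len sep * ((n : Int) - 1)) →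
      pvALoop parts sep max_len (PySem.List.pyRange (n : Int) 0 (-1)) =
        pvBLoop parts sep max_len (PySem.List.pyRange (n : Int) 0 (-1)) candLen := by
  intro n
  induction n with
  | zero =>
      intro _ candLen _
      rw [PySem.List.pyRange_neg_one_eq_nil (by norm_num)]
      rfl
  | succ m ih =>
      intro hle candLen hinv
      have hinv' := hinv (by omega)
      have hcons : PySem.List.pyRange ((m + 1 : Nat) : Int) 0 (-1)
          = ((m + 1 : Nat) : Int) :: PySem.List.pyRange ((m : Nat) : Int) 0 (-1) := by
        rw [PySem.List.pyRange_neg_one_cons (by positivity)]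
        norm_num
      rw [hcons]
      simp only [pvALoop, pvBLoop]
      have htklen : ((parts.take (m + 1)).length : Int) = ((m + 1 : Nat) : Int) := by
        simp [List.length_take]; omega
      have hcand : PySem.Str.len (PySem.Str.join sep (PySem.List.slice parts none (some ((m + 1 : Nat) : Int))))
          = candLen := by
        rw [PySem.List.slice_to_natCast parts (m + 1),
            pv_len_join_take parts sep (m + 1) (by omega) hne, htklen, hinv']
      have hsuf : PySem.Str.len (if ((m + 1 : Nat) : Int) < (parts.length : Int)
            then sep ++ "+" ++ PySem.Int.toStr ((parts.length : Int) - ((m + 1 : Nat) : Int)) else "")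
          = (if ((m + 1 : Nat) : Int) = (parts.length : Int) then 0
             else PySem.Str.len sep + 1
               + PySem.Str.len (PySem.Int.toStr ((parts.length : Int) - ((m + 1 : Nat) : Int)))) := by
        rcases lt_or_eq_of_le (show ((m + 1 : Nat) : Int) ≤ (parts.length : Int) by exact_mod_cast hle) with hlt | heq
        · rw [if_pos hlt, if_neg (by omega), PySem.Str.len_append, PySem.Str.len_append, pv_len_plus]
        · rw [if_neg (by omega), if_pos heq]
          decide
      rw [hcand, hsuf]
      have hmlt : m < parts.length := by omega
      have hget : PySem.List.pyGetD parts (((m + 1 : Nat) : Int) - 1) "" = parts[m] := by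
        have hc : (((m + 1 : Nat) : Int) - 1) = ((m : Nat) : Int) := by push_cast; ring
        rw [hc, PySem.List.pyGetD_eq_getElem parts "" (by positivity) (by exact_mod_cast hmlt)]
        simp
      have hstep : ((parts.take (m + 1)).map PySem.Str.len).sum
          = ((parts.take m).map PySem.Str.len).sum + PySem.Str.len parts[m] := by
        rw [List.map_take, List.map_take,
            List.sum_take_succ (parts.map PySem.Str.len) m (by simpa using hmlt)]
        simp
      split_ifs <;>
        first
          | rfl
          | (apply ih (by omega)
             intro h1m
             first
               | omega
               | (rw [hget, hinv', hstep]; push_cast; ring))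

-- ===== VERDICT (by name: the statement is the Claim_ definition above) =====
theorem truncate_parts_py_spec : Claim_equal_truncate_parts_py := by
  intro parts sep max_len _
  unfold Spec_truncate_parts_py truncate_parts_py truncate_parts_py_alt
  by_cases hp : parts = []
  · simp [hp]
  · simp only [if_neg hp]
    have hk1 : 1 ≤ parts.length := by
      cases parts with
      | nil => exact absurd rfl hp
      | cons a t => simp
    have hfull : PySem.Str.len (PySem.Str.join sep parts)
        = (parts.map PySem.Str.len).sum + PySem.Str.len sep * ((parts.length : Int) - 1) := by
      have h := pv_len_join_take parts sep parts.length hk1 hp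
      rw [List.take_length] at h
      exact h
    rw [hfull]
    split_ifs with h
    · rfl
    · exact pv_loop_eq parts sep max_len hp parts.length le_rfl _
        (fun _ => by rw [List.take_length])
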